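-- pv_equiv track=rewrite | github.com/JessicaOlivares2/rpl_campus-virtual | campus-virtual/temp-executions/submission-1764001788050-8337/solucion.py | procesar_cadena
-- ===== SOURCE A (Python) =====
-- def procesar_cadena(s):
--     cadena_invertida = s[::-1]
--     conteo_vocales = 0
--     vocales = "aeiouAEIOU"
--     for caracter in cadena_invertida:
--         if caracter in vocales:
--             conteo_vocales += 1
--     return (cadena_invertida, conteo_vocales)
-- ===== SOURCE B (Python) =====
-- def procesar_cadena(s):
--     invertida = ''.join(reversed(s))
--     total = sum(s.count(v) for v in "aeiouAEIOU")
--     return (invertida, total)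
-- ===== Notes on version B (the rewrite author's own statement) =====
-- stated objective: alternative
-- what changed: Instead of scanning the reversed string once with a per-character membership branch, B sums str.count(v) over the ten vowel characters (ten bulk library scans of the original string) and builds the reversal by joining reversed(s).
import Mathlib
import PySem

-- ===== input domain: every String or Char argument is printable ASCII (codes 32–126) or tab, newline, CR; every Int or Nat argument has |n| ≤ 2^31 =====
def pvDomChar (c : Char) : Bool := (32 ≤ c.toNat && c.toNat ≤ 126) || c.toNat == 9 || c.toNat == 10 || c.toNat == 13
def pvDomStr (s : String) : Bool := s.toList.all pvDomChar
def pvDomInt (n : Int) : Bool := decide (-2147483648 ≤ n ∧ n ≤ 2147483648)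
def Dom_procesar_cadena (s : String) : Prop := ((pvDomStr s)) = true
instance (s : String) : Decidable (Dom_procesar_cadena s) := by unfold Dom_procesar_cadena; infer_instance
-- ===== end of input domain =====

-- B replaces A's per-character vowel-membership loop over the reversed string by summing s.count(v) over the ten vowel characters (ten bulk scans), and builds the reversal by joining reversed(s); an alternative of the same cost.


-- ===== PORT A =====
-- vocales = "aeiouAEIOU"
def pvVocales : List Char := "aeiouAEIOU".toList

def procesar_cadena (s : String) : String × Int :=
  let cadena_invertida := (PySem.Str.slice? s none none (-1)).getD ""   -- s[::-1]; step ≠ 0, always some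
  let conteo_vocales : Int :=
    cadena_invertida.toList.foldl
      (fun acc caracter => if pvVocales.contains caracter then acc + 1 else acc) 0
  (cadena_invertida, conteo_vocales)

-- ===== PORT B =====
def procesar_cadena_alt (s : String) : String × Int :=
  -- invertida = join of reversed(s); total = sum(s.count(v) for v in "aeiouAEIOU")
  let invertida := String.ofList s.toList.reverse
  let total : Int :=
    ("aeiouAEIOU".toList.map (fun v => (PySem.Str.count s (String.ofList [v]) : Int))).sum
  (invertida, total)

-- ===== PRECONDITION & SPEC =====
def Spec_procesar_cadena (s : String) (out : String × Int) : Prop := out = procesar_cadena_alt s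
instance (s : String) (out : String × Int) : Decidable (Spec_procesar_cadena s out) := by unfold Spec_procesar_cadena; infer_instance

-- ===== CLAIM (what is proved, stated in full; the proofs are below) =====
def Claim_equal_procesar_cadena : Prop := ∀ (s : String), Dom_procesar_cadena s → Spec_procesar_cadena s (procesar_cadena s)

-- ===== LEMMAS AND PROOFS =====
-- str.count with a single-character needle counts occurrences of that character
theorem pv_go_single (v : Char) : ∀ (fuel : Nat) (l : List Char) (acc : Nat), l.length ≤ fuel →
    PySem.Chars.count.go [v] fuel l acc = acc + l.count v := by
  intro fuel
  induction fuel with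
  | zero => intro l acc h; cases l with
    | nil => simp [PySem.Chars.count.go]
    | cons h t => simp at h
  | succ n ih =>
    intro l acc h
    cases l with
    | nil => simp [PySem.Chars.count.go]
    | cons c t =>
      simp only [PySem.Chars.count.go]
      by_cases hv : c = v
      · subst hv
        rw [if_pos (by simp [List.isPrefixOf])]
        simp only [List.length_singleton, List.drop_one, List.tail_cons]
        rw [ih t (acc+1) (by simpa using h), List.count_cons_self]
        omega
      · rw [if_neg (by simp [List.isPrefixOf]; exact fun hh => hv hh.symm)]
        rw [ih t acc (by simpa using h)]
        simp [hv]

theorem pv_count_single (l : List Char) (v : Char) :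
    PySem.Chars.count l [v] = l.count v := by
  simp only [PySem.Chars.count, List.isEmpty_cons, Bool.false_eq_true, if_false]
  rw [pv_go_single v l.length l 0 le_rfl]; omega

-- a membership test against v :: vs splits into "counts v" plus "in vs" when v is not in vs
theorem pv_disj (v : Char) (vs : List Char) (hv : v ∉ vs) :
    ∀ l : List Char,
      l.countP (fun c => (v :: vs).contains c) = l.count v + l.countP (fun c => vs.contains c) := by
  intro l
  induction l with
  | nil => simp
  | cons c t ih =>
    rw [List.countP_cons, List.countP_cons, List.count_cons, ih]
    by_cases hc : c = v
    · subst hc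
      have h0 : vs.contains c = false := by
        simp only [List.contains_eq_mem, decide_eq_false_iff_not]; exact hv
      simp only [List.contains_cons, BEq.rfl, Bool.true_or, if_true]
      simp [hv]
      omega
    · have h2 : ¬ v = c := fun hh => hc hh.symm
      simp only [List.contains_cons, beq_iff_eq, hc]
      simp [hc]
      omega

-- a membership count against a duplicate-free alphabet splits into per-letter counts
theorem pv_countP_contains (V : List Char) (hV : V.Nodup) (l : List Char) :
    l.countP (fun c => V.contains c) = (V.map (fun v => l.count v)).sum := by
  induction V with
  | nil => simp
  | cons v vs ih =>
    have hv : v ∉ vs := (List.nodup_cons.mp hV).1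
    have hvs : vs.Nodup := (List.nodup_cons.mp hV).2
    rw [List.map_cons, List.sum_cons, pv_disj v vs hv l, ih hvs]

theorem pv_sum_cast (V : List Char) (f : Char → Nat) :
    (V.map (fun v => (f v : Int))).sum = ((V.map f).sum : Int) := by
  induction V with
  | nil => simp
  | cons v vs ih => simp [ih]

theorem procesar_cadena_spec : Claim_equal_procesar_cadena := by
  intro s _
  show procesar_cadena s = procesar_cadena_alt s
  simp only [procesar_cadena, procesar_cadena_alt]
  rw [PySem.Str.slice?_none_none_neg_one]
  refine Prod.ext rfl ?_
  simp only [Option.getD_some]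
  rw [show (String.ofList s.toList.reverse).toList = s.toList.reverse from by simp]
  rw [PySem.List.foldl_if_add_one, List.countP_reverse, zero_add]
  have hc : ∀ v ∈ "aeiouAEIOU".toList,
      ((PySem.Str.count s (String.ofList [v]) : Int)) = ((s.toList.count v : Int)) := by
    intro v _
    rw [PySem.Str.count_eq, show (String.ofList [v]).toList = [v] from by simp, pv_count_single]
  rw [List.map_congr_left hc, pv_sum_cast]
  simp only [pvVocales]
  norm_cast
  exact pv_countP_contains "aeiouAEIOU".toList (by decide) s.toList
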